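-- pv_equiv track=rewrite | github.com/gonryoonden/safety-ai | units_to_md.py | table_summaries_from_text
-- ===== SOURCE A (Python) =====
-- from typing import Any, Dict, Iterable, List, Optional, Tuple
--
-- def table_summaries_from_text(md_text: str, max_lines: int = 2) -> List[str]:
--     lines = (md_text or "").splitlines()
--     out: List[str] = []; buf: List[str] = []; inside_table = False
--     for ln in lines:
--         if ln.strip().startswith("|") and ln.strip().endswith("|"):
--             inside_table = True; buf.append(ln.strip())
--         else:
--             if inside_table and buf:
--                 out.append(" ".join(buf[:max_lines]))
--                 buf = []; inside_table = False
--     if inside_table and buf: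
--         out.append(" ".join(buf[:max_lines]))
--     return out
-- ===== SOURCE B (Python) =====
-- from typing import List
--
-- def table_summaries_from_text(md_text: str, max_lines: int = 2) -> List[str]:
--     def is_table(ln: str) -> bool:
--         s = ln.strip()
--         return s.startswith("|") and s.endswith("|")
--
--     lines = (md_text or "").splitlines()
--     out: List[str] = []
--     i, n = 0, len(lines)
--     while i < n:
--         k = is_table(lines[i])
--         j = i + 1
--         while j < n and is_table(lines[j]) == k:
--             j += 1
--         if k:
--             rows = [ln.strip() for ln in lines[i:j]]
--             out.append(" ".join(rows[:max_lines]))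
--         i = j
--     return out
-- ===== Notes on version B (the rewrite author's own statement) =====
-- stated objective: alternative
-- what changed: Replaces A's single stateful pass with a buffer list and inside_table flag by run-segmentation: an index scan finds each maximal run of consecutive table/non-table lines and emits one joined summary per table run, with no cross-iteration buffer or flag.
import Mathlib
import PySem

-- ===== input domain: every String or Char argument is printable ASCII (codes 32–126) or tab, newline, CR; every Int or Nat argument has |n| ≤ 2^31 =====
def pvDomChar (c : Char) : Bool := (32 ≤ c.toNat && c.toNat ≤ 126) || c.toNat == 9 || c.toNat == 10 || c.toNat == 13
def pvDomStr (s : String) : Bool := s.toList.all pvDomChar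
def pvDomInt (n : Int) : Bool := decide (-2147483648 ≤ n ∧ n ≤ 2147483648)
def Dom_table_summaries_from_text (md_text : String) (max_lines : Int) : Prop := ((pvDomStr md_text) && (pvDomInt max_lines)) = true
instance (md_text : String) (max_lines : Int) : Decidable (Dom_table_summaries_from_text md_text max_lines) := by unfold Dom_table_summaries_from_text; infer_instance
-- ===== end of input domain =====

-- B replaces A's stateful buffer/flag single pass by an index-free run-segmentation:
-- scan out each maximal run of table/non-table lines and emit summaries per table run ("alternative" objective).


-- " ".join(rows[:max_lines])  (shared by both ports: both Pythons write exactly this expression)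
def pvEmit (max_lines : Int) (rows : List String) : String :=
  PySem.Str.join " " (PySem.List.slice rows none (some max_lines))

-- ln.strip().startswith("|") and ln.strip().endswith("|")
def pvIsTable (ln : String) : Bool :=
  PySem.Str.startswith (PySem.Str.strip ln) "|" && PySem.Str.endswith (PySem.Str.strip ln) "|"

-- ===== PORT A =====
-- loop body of A: state = (out, buf, inside_table)
def pvStepA (max_lines : Int) (st : List String × List String × Bool) (ln : String) :
    List String × List String × Bool :=
  let out := st.1; let buf := st.2.1; let inside := st.2.2
  if pvIsTable ln then
    (out, buf ++ [PySem.Str.strip ln], true)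
  else if inside && !buf.isEmpty then
    (out ++ [pvEmit max_lines buf], [], false)
  else
    (out, buf, inside)

def table_summaries_from_text (md_text : String) (max_lines : Int) : List String :=
  let lines := PySem.Str.splitlines md_text
  let st := lines.foldl (pvStepA max_lines) ([], [], false)
  if st.2.2 && !st.2.1.isEmpty then st.1 ++ [pvEmit max_lines st.2.1] else st.1

-- ===== PORT B =====
-- inner while of B: take the maximal prefix whose is_table equals k
def pvTakeRun (k : Bool) : List String → List String × List String
  | [] => ([], [])
  | ln :: rest =>
    if pvIsTable ln == k then
      let gr := pvTakeRun k rest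
      (ln :: gr.1, gr.2)
    else ([], ln :: rest)

theorem pvTakeRun_len (k : Bool) : ∀ l : List String, (pvTakeRun k l).2.length ≤ l.length := by
  intro l
  induction l with
  | nil => simp [pvTakeRun]
  | cons ln rest ih =>
    simp only [pvTakeRun]
    split
    · simpa using Nat.le_succ_of_le ih
    · simp

-- outer while of B: one iteration per maximal run
def pvRunsOut (max_lines : Int) : List String → List String
  | [] => []
  | ln :: rest =>
    let k := pvIsTable ln
    let gr := pvTakeRun k rest
    (if k then [pvEmit max_lines ((ln :: gr.1).map PySem.Str.strip)] else []) ++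
      pvRunsOut max_lines gr.2
termination_by l => l.length
decreasing_by
  exact Nat.lt_succ_of_le (pvTakeRun_len _ _)

def table_summaries_from_text_alt (md_text : String) (max_lines : Int) : List String :=
  pvRunsOut max_lines (PySem.Str.splitlines md_text)

-- ===== PRECONDITION & SPEC =====
def Spec_table_summaries_from_text (md_text : String) (max_lines : Int) (out : List String) : Prop := out = table_summaries_from_text_alt md_text max_lines
instance (md_text : String) (max_lines : Int) (out : List String) : Decidable (Spec_table_summaries_from_text md_text max_lines out) := by unfold Spec_table_summaries_from_text; infer_instance

-- ===== CLAIM (what is proved, stated in full; the proofs are below) =====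
def Claim_equal_table_summaries_from_text : Prop := ∀ (md_text : String) (max_lines : Int), Dom_table_summaries_from_text md_text max_lines → Spec_table_summaries_from_text md_text max_lines (table_summaries_from_text md_text max_lines)

-- ===== LEMMAS AND PROOFS =====

theorem pvTakeRun_cons_eq (k : Bool) (ln : String) (rest : List String) (h : pvIsTable ln = k) :
    pvTakeRun k (ln :: rest) = (ln :: (pvTakeRun k rest).1, (pvTakeRun k rest).2) := by
  simp [pvTakeRun, h]

theorem pvTakeRun_cons_ne (k : Bool) (ln : String) (rest : List String) (h : ¬ pvIsTable ln = k) :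
    pvTakeRun k (ln :: rest) = ([], ln :: rest) := by
  simp [pvTakeRun, h]

-- skipping a non-table line at the front does not change B's output
theorem pvRunsOut_false_cons (ml : Int) (ln : String) (rest : List String)
    (h : pvIsTable ln = false) :
    pvRunsOut ml (ln :: rest) = pvRunsOut ml rest := by
  rw [pvRunsOut]
  simp only [h, Bool.false_eq_true, if_false, List.nil_append]
  cases rest with
  | nil => simp [pvTakeRun]
  | cons m rest' =>
    by_cases hm : pvIsTable m = false
    · conv_rhs => rw [pvRunsOut]
      simp [pvTakeRun, hm]
    · simp only [Bool.not_eq_false] at hm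
      rw [pvTakeRun_cons_ne false m rest' (by simp [hm])]


theorem pvRunsOut_nil (ml : Int) : pvRunsOut ml [] = [] := by rw [pvRunsOut]

-- what A's fold-with-finalisation computes from a mid-run state, expressed through B's run scanner
def pvCont (ml : Int) (buf : List String) (lines : List String) : List String :=
  match buf with
  | [] => pvRunsOut ml lines
  | _ :: _ =>
    pvEmit ml (buf ++ (pvTakeRun true lines).1.map PySem.Str.strip) ::
      pvRunsOut ml (pvTakeRun true lines).2

def pvFin (ml : Int) (st : List String × List String × Bool) : List String :=
  if st.2.2 && !st.2.1.isEmpty then st.1 ++ [pvEmit ml st.2.1] else st.1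

-- absorbing a table line into the pending buffer = starting/extending the table run
theorem pvCont_table (ml : Int) (buf : List String) (ln : String) (rest : List String)
    (hk : pvIsTable ln = true) :
    pvCont ml (buf ++ [PySem.Str.strip ln]) rest = pvCont ml buf (ln :: rest) := by
  cases buf with
  | nil =>
    show pvCont ml [PySem.Str.strip ln] rest = pvRunsOut ml (ln :: rest)
    rw [pvRunsOut]
    simp only [hk, if_true, pvCont, List.map_cons, List.singleton_append]
  | cons b bs =>
    show pvEmit ml ((b :: bs ++ [PySem.Str.strip ln]) ++ (pvTakeRun true rest).1.map PySem.Str.strip) ::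
        pvRunsOut ml (pvTakeRun true rest).2 = _
    rw [show pvCont ml (b :: bs) (ln :: rest)
        = pvEmit ml ((b :: bs) ++ (pvTakeRun true (ln :: rest)).1.map PySem.Str.strip) ::
          pvRunsOut ml (pvTakeRun true (ln :: rest)).2 from rfl]
    rw [pvTakeRun_cons_eq true ln rest hk]
    simp [List.append_assoc]

theorem pvInv (ml : Int) : ∀ (lines : List String) (out buf : List String),
    pvFin ml (lines.foldl (pvStepA ml) (out, buf, !buf.isEmpty)) = out ++ pvCont ml buf lines := by
  intro lines
  induction lines with
  | nil =>
    intro out buf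
    cases buf with
    | nil => simp [pvFin, pvCont]; rw [pvRunsOut]
    | cons b bs =>
      simp only [List.foldl_nil, pvFin, List.isEmpty_cons, Bool.not_false, Bool.and_self, if_true,
        pvCont, pvTakeRun, List.map_nil, List.append_nil, pvRunsOut_nil]
  | cons ln rest ih =>
    intro out buf
    rw [List.foldl_cons]
    by_cases hk : pvIsTable ln = true
    · have hstep : pvStepA ml (out, buf, !buf.isEmpty) ln
          = (out, buf ++ [PySem.Str.strip ln], !(buf ++ [PySem.Str.strip ln]).isEmpty) := by
        simp [pvStepA, hk]
      rw [hstep, ih, pvCont_table ml buf ln rest hk]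
    · simp only [Bool.not_eq_true] at hk
      cases buf with
      | nil =>
        have hstep : pvStepA ml (out, ([] : List String), !(List.isEmpty ([] : List String))) ln
            = (out, [], !(List.isEmpty ([] : List String))) := by
          simp [pvStepA, hk]
        rw [hstep, ih]
        show out ++ pvRunsOut ml rest = out ++ pvRunsOut ml (ln :: rest)
        rw [pvRunsOut_false_cons ml ln rest hk]
      | cons b bs =>
        have hstep : pvStepA ml (out, b :: bs, !(List.isEmpty (b :: bs))) ln
            = (out ++ [pvEmit ml (b :: bs)], [], !(List.isEmpty ([] : List String))) := by
          simp [pvStepA, hk]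
        rw [hstep, ih]
        show (out ++ [pvEmit ml (b :: bs)]) ++ pvRunsOut ml rest
            = out ++ pvEmit ml ((b :: bs) ++ (pvTakeRun true (ln :: rest)).1.map PySem.Str.strip) ::
                pvRunsOut ml (pvTakeRun true (ln :: rest)).2
        rw [pvTakeRun_cons_ne true ln rest (by simp [hk]), pvRunsOut_false_cons ml ln rest hk]
        simp

-- ===== VERDICT (by name: the statement is the Claim_ definition above) =====
theorem table_summaries_from_text_spec : Claim_equal_table_summaries_from_text := by
  intro md ml _
  show table_summaries_from_text md ml = table_summaries_from_text_alt md ml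
  have h := pvInv ml (PySem.Str.splitlines md) [] []
  simpa [pvFin, pvCont, table_summaries_from_text, table_summaries_from_text_alt] using h
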